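-- pv_equiv track=rewrite | github.com/kierwynd/MO_LWV | ReCom_LocalSearch_MO.py | colorTree
-- ===== SOURCE A (Python) =====
-- def colorTree(tree,nodes,split):
--
--     # To color units, according to split. Initially color all nodes 'blue'
--     labels = {}
--     for n in nodes:
--         labels[n] = 'blue'
--
--     # Color split 'red', then color all paths that end at split 'red'
--     labels[split] = 'red'
--     for n in nodes:
--         skip = False
--         unit = n
--         while labels[unit] == 'blue':
--             unit = tree[unit]
--             if unit == 'Null':
--                 skip = True
--                 break
--
--         if not skip:
--             value = labels[unit]
--             unit = n
--             while labels[unit] == 'blue':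
--                 labels[unit] = value
--                 unit = tree[unit]
--                 if unit == 'Null':
--                     break
--
--     return labels
-- ===== SOURCE B (Python) =====
-- def colorTree(tree, nodes, split):
--     # Bottom-up fixpoint: grow the red set from split instead of walking chains per node.
--     red = {split}
--     for _ in range(len(nodes)):
--         red = red | {n for n in nodes if tree.get(n) != 'Null' and tree.get(n) in red}
--     labels = {n: ('red' if n in red else 'blue') for n in nodes}
--     labels[split] = 'red'
--     return labels
-- ===== Notes on version B (the rewrite author's own statement) =====
-- stated objective: simpler
-- what changed: Replaces A's per-node upward chain walking with in-place dict recoloring by a bottom-up fixpoint iteration that grows the red set from split and then builds the labels in one dict comprehension.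
import Mathlib
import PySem

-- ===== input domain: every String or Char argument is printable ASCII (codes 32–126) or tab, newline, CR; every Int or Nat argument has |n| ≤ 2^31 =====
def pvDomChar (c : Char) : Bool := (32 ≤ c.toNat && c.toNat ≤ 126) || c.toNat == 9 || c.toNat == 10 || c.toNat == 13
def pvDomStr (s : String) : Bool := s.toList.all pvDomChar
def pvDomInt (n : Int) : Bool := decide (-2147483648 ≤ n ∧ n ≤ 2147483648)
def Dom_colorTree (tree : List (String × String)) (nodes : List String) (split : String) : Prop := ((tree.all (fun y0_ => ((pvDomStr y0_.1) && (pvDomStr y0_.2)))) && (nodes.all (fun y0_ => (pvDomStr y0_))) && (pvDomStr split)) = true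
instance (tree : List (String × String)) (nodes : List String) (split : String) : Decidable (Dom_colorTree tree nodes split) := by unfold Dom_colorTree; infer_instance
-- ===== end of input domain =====

-- B replaces A's per-node upward chain walking with dict recoloring by a bottom-up
-- fixpoint iteration growing the red set from split (same cost class; shorter and plainer).


-- ===== PORT A =====
-- first while loop: walk up while the current node's label is 'blue'; some w = stop at the
-- non-blue node w, none = reached the 'Null' sentinel (skip) or KeyError/fuel (outside Pre_)
def pvWalk1 (tree : List (String × String)) (labels : PySem.Dict String String) :
    Nat → String → Option String
  | 0, _ => none
  | f+1, u =>
    match labels.get? u with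
    | none => none
    | some s =>
      if s == "blue" then
        match (PySem.Dict.mk tree).get? u with
        | none => none
        | some v => if v == "Null" then none else pvWalk1 tree labels f v
      else some u

-- second while loop: recolor the blue nodes along the same chain with `value`
def pvWalk2 (tree : List (String × String)) (value : String) :
    Nat → PySem.Dict String String → String → PySem.Dict String String
  | 0, d, _ => d
  | f+1, d, u =>
    match d.get? u with
    | none => d
    | some s =>
      if s == "blue" then
        let d' := d.insert u value
        match (PySem.Dict.mk tree).get? u with
        | none => d'
        | some v => if v == "Null" then d' else pvWalk2 tree value f d' v
      else d

def colorTree (tree : List (String × String)) (nodes : List String) (split : String) :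
    List (String × String) :=
  let labels0 : PySem.Dict String String :=
    nodes.foldl (fun d n => d.insert n "blue") PySem.Dict.empty
  let labels1 := labels0.insert split "red"
  let fin := nodes.foldl (fun d n =>
    match pvWalk1 tree d (nodes.length + 1) n with
    | none => d
    | some w => pvWalk2 tree ((d.get? w).getD "") (nodes.length + 1) d n) labels1
  fin.items

-- ===== PORT B =====
def colorTree_alt (tree : List (String × String)) (nodes : List String) (split : String) :
    List (String × String) :=
  let red : PySem.Set String := (List.range nodes.length).foldl
    (fun r _ => PySem.Set.union r (nodes.filter (fun n =>
        match (PySem.Dict.mk tree).get? n with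
        | some p => p != "Null" && PySem.Set.contains r p
        | none => false)))
    (PySem.Set.ofList [split])
  let labels : PySem.Dict String String := nodes.foldl
    (fun d n => d.insert n (if PySem.Set.contains red n then "red" else "blue"))
    PySem.Dict.empty
  (labels.insert split "red").items

-- ===== PRECONDITION & SPEC =====
-- well-formed forest shape: from every node the parent chain reaches split or the 'Null'
-- sentinel without leaving nodes and without cycling (so within |nodes|+1 steps); these are
-- exactly the inputs on which A's walks terminate with no KeyError (elsewhere A raises or loops)
def pvTerm (tree : List (String × String)) (nodes : List String) (split : String) :
    Nat → String → Bool
  | 0, _ => false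
  | f+1, u => u == split ||
      (decide (u ∈ nodes) && match (PySem.Dict.mk tree).get? u with
        | none => false
        | some v => v == "Null" || pvTerm tree nodes split f v)

def Pre_colorTree (tree : List (String × String)) (nodes : List String) (split : String) : Prop :=
  ∀ n ∈ nodes, pvTerm tree nodes split (nodes.length + 1) n = true
instance (tree : List (String × String)) (nodes : List String) (split : String) :
    Decidable (Pre_colorTree tree nodes split) := by unfold Pre_colorTree; infer_instance

def pvWitness_colorTree : (List (String × String)) × List String × String :=
  ([("a", "b"), ("b", "Null")], ["a", "b"], "b")

def Spec_colorTree (tree : List (String × String)) (nodes : List String) (split : String)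
    (out : List (String × String)) : Prop := out = colorTree_alt tree nodes split
instance (tree : List (String × String)) (nodes : List String) (split : String)
    (out : List (String × String)) : Decidable (Spec_colorTree tree nodes split out) := by
  unfold Spec_colorTree; infer_instance

-- ===== CLAIM (what is proved, stated in full; the proofs are below) =====
def Claim_equal_colorTree : Prop := ∀ (tree : List (String × String)) (nodes : List String) (split : String), Dom_colorTree tree nodes split → Pre_colorTree tree nodes split → Spec_colorTree tree nodes split (colorTree tree nodes split)

-- ===== LEMMAS AND PROOFS =====


def pvReach (tree : List (String × String)) (nodes : List String) (split : String) :
    Nat → String → Bool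
  | 0, u => u == split
  | f+1, u => u == split ||
      (decide (u ∈ nodes) && match (PySem.Dict.mk tree).get? u with
        | none => false
        | some v => v != "Null" && pvReach tree nodes split f v)

theorem reach_succ (tree : List (String × String)) (nodes : List String) (split : String)
    (f : Nat) (u : String) : pvReach tree nodes split (f+1) u = (u == split ||
      (decide (u ∈ nodes) && match (PySem.Dict.mk tree).get? u with
        | none => false
        | some v => v != "Null" && pvReach tree nodes split f v)) := rfl

theorem reach_split (tree : List (String × String)) (nodes : List String) (split : String)
    (f : Nat) : pvReach tree nodes split f split = true := by
  cases f <;> simp [pvReach]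

theorem reach_shape (tree : List (String × String)) (nodes : List String) (split : String)
    (f : Nat) (u : String) (h : pvReach tree nodes split f u = true) :
    u = split ∨ u ∈ nodes := by
  cases f with
  | zero => left; simpa [pvReach] using h
  | succ f =>
    rw [reach_succ] at h
    simp only [Bool.or_eq_true, Bool.and_eq_true, beq_iff_eq, decide_eq_true_eq] at h
    rcases h with h | ⟨h, _⟩
    · exact Or.inl h
    · exact Or.inr h

theorem reach_mono (tree : List (String × String)) (nodes : List String) (split : String)
    (f : Nat) : ∀ u, pvReach tree nodes split f u = true →
      pvReach tree nodes split (f+1) u = true := by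
  induction f with
  | zero =>
    intro u h
    simp only [pvReach] at h
    rw [reach_succ]
    simp [h]
  | succ f ih =>
    intro u h
    rw [reach_succ] at h
    rw [reach_succ]
    cases hg : (PySem.Dict.mk tree).get? u with
    | none => simpa [hg] using h
    | some v =>
      simp only [hg, Bool.or_eq_true, Bool.and_eq_true] at h ⊢
      rcases h with h | ⟨h1, h2, h3⟩
      · exact Or.inl h
      · exact Or.inr ⟨h1, h2, ih v h3⟩

theorem reach_le (tree : List (String × String)) (nodes : List String) (split : String)
    {f g : Nat} (hle : f ≤ g) (u : String) (h : pvReach tree nodes split f u = true) :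
    pvReach tree nodes split g u = true := by
  induction g with
  | zero => exact Nat.le_zero.1 hle ▸ h
  | succ g ih =>
    rcases Nat.lt_or_ge f (g+1) with hf | hf
    · exact reach_mono tree nodes split g u (ih (Nat.lt_succ_iff.1 hf))
    · exact Nat.le_antisymm hle hf ▸ h

theorem fix_step (tree : List (String × String)) (nodes : List String) (split : String)
    (f : Nat) (h : ∀ u, pvReach tree nodes split (f+1) u = pvReach tree nodes split f u) :
    ∀ u, pvReach tree nodes split (f+2) u = pvReach tree nodes split (f+1) u := by
  intro u
  rw [show f+2 = (f+1)+1 from rfl, reach_succ tree nodes split (f+1) u,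
    reach_succ tree nodes split f u]
  cases hg : (PySem.Dict.mk tree).get? u with
  | none => rfl
  | some v => simp [h v]

theorem fix_all (tree : List (String × String)) (nodes : List String) (split : String)
    (f : Nat) (h : ∀ u, pvReach tree nodes split (f+1) u = pvReach tree nodes split f u) :
    ∀ k u, pvReach tree nodes split (f+k+1) u = pvReach tree nodes split (f+k) u := by
  intro k
  induction k with
  | zero => exact h
  | succ k ih => exact fix_step tree nodes split (f+k) ih

theorem fix_ge (tree : List (String × String)) (nodes : List String) (split : String)
    (f : Nat) (h : ∀ u, pvReach tree nodes split (f+1) u = pvReach tree nodes split f u)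
    (k : Nat) : ∀ u, pvReach tree nodes split (f+k) u = pvReach tree nodes split f u := by
  induction k with
  | zero => intro u; rfl
  | succ k ih =>
    intro u
    rw [show f + (k+1) = f + k + 1 by omega, fix_all tree nodes split f h k u, ih u]

theorem exists_fix (tree : List (String × String)) (nodes : List String) (split : String) :
    ∃ f ≤ nodes.length, ∀ u, pvReach tree nodes split (f+1) u = pvReach tree nodes split f u := by
  by_contra hc
  push_neg at hc
  set T : Finset String := insert split nodes.toFinset with hT
  have hTcard : T.card ≤ nodes.length + 1 := by
    calc T.card ≤ nodes.toFinset.card + 1 := Finset.card_insert_le _ _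
    _ ≤ nodes.length + 1 := by
        have := nodes.toFinset_card_le
        omega
  have grow : ∀ k ≤ nodes.length + 1, k + 1 ≤
      (T.filter (fun u => pvReach tree nodes split k u = true)).card := by
    intro k
    induction k with
    | zero =>
      intro _
      have hs : split ∈ T.filter (fun u => pvReach tree nodes split 0 u = true) := by
        simp [hT, reach_split]
      have := Finset.card_pos.2 ⟨split, hs⟩
      omega
    | succ k ih =>
      intro hk
      have hk' : k ≤ nodes.length := by omega
      obtain ⟨u, hu⟩ := hc k hk'
      have hu2 : pvReach tree nodes split (k+1) u = true ∧
          pvReach tree nodes split k u = false := by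
        cases h1 : pvReach tree nodes split k u with
        | false =>
          cases h2 : pvReach tree nodes split (k+1) u with
          | false => exact absurd (h2.trans h1.symm) hu
          | true => exact ⟨rfl, rfl⟩
        | true =>
          have := reach_mono tree nodes split k u h1
          exact absurd (this.trans h1.symm) hu
      have huT : u ∈ T := by
        rcases reach_shape tree nodes split (k+1) u hu2.1 with h | h
        · simp [hT, h]
        · simp [hT, h]
      have hss : T.filter (fun u => pvReach tree nodes split k u = true) ⊂
          T.filter (fun u => pvReach tree nodes split (k+1) u = true) := by
        constructor
        · intro x hx
          simp only [Finset.mem_filter] at hx ⊢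
          exact ⟨hx.1, reach_mono tree nodes split k x hx.2⟩
        · intro hsub
          have := hsub (Finset.mem_filter.2 ⟨huT, hu2.1⟩)
          simp only [Finset.mem_filter] at this
          rw [hu2.2] at this
          exact absurd this.2 (by simp)
      have := Finset.card_lt_card hss
      have := ih (by omega)
      omega
  have h1 := grow (nodes.length + 1) le_rfl
  have h2 : (T.filter (fun u => pvReach tree nodes split (nodes.length + 1) u = true)).card ≤
      T.card := Finset.card_filter_le _ _
  omega

theorem reach_ge_len (tree : List (String × String)) (nodes : List String) (split : String)
    (f : Nat) (u : String) (h : pvReach tree nodes split f u = true) :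
    pvReach tree nodes split nodes.length u = true := by
  rcases Nat.le_total f nodes.length with hle | hge
  · exact reach_le tree nodes split hle u h
  · obtain ⟨f0, hf0, hfix⟩ := exists_fix tree nodes split
    have e1 := fix_ge tree nodes split f0 hfix (f - f0) u
    rw [show f0 + (f - f0) = f by omega] at e1
    have e2 := fix_ge tree nodes split f0 hfix (nodes.length - f0) u
    rw [show f0 + (nodes.length - f0) = nodes.length by omega] at e2
    rw [e2, ← e1, h]

theorem reach_step (tree : List (String × String)) (nodes : List String) (split : String)
    (u v : String) (hu : u ∈ nodes) (hg : (PySem.Dict.mk tree).get? u = some v)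
    (hv : v ≠ "Null") :
    (pvReach tree nodes split nodes.length u = true ↔
      (u = split ∨ pvReach tree nodes split nodes.length v = true)) := by
  constructor
  · intro h
    cases hN : nodes.length with
    | zero =>
      rw [hN] at h
      left; simpa [pvReach] using h
    | succ m =>
      rw [hN, reach_succ] at h
      simp only [hg, Bool.or_eq_true, Bool.and_eq_true, beq_iff_eq, decide_eq_true_eq] at h
      rcases h with h | ⟨_, _, h3⟩
      · exact Or.inl h
      · right
        exact reach_mono tree nodes split m v h3
  · intro h
    rcases h with h | h
    · exact h ▸ reach_split tree nodes split nodes.length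
    · apply reach_ge_len tree nodes split (nodes.length + 1)
      rw [reach_succ]
      simp only [hg, Bool.or_eq_true, Bool.and_eq_true, beq_iff_eq, decide_eq_true_eq]
      right
      refine ⟨hu, ?_, h⟩
      simpa using hv


def pvVal (P : String → Bool) (n : String) : String := if P n then "red" else "blue"
def pvD (nodes : List String) (P : String → Bool) : PySem.Dict String String :=
  nodes.foldl (fun d n => d.insert n (pvVal P n)) PySem.Dict.empty
def pvM (nodes : List String) (split : String) (P : String → Bool) : PySem.Dict String String :=
  (pvD nodes P).insert split "red"

theorem get?_foldl_insert_fun (f : String → String) (l : List String)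
    (d : PySem.Dict String String) (u : String) :
    (l.foldl (fun d n => d.insert n (f n)) d).get? u =
      if u ∈ l then some (f u) else d.get? u := by
  induction l generalizing d with
  | nil => simp
  | cons n t ih =>
    simp only [List.foldl_cons, ih, PySem.Dict.get?_insert, List.mem_cons]
    by_cases h1 : u ∈ t <;> by_cases h2 : u = n <;> simp [h1, h2]

theorem items_foldl_insert_fun (f : String → String) (l : List String) :
    (l.foldl (fun d n => d.insert n (f n)) PySem.Dict.empty).items =
      (PySem.Set.ofList l).map (fun n => (n, f n)) := by
  have hk : (l.foldl (fun d n => d.insert n (f n)) PySem.Dict.empty).keys = PySem.Set.ofList l := by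
    rw [PySem.Dict.keys_foldl_insert]
    simp [PySem.Set.update_nil_left]
  have hnd : (l.foldl (fun d n => d.insert n (f n)) PySem.Dict.empty).keys.Nodup := by
    apply PySem.Dict.nodup_keys_foldl_insert
    simp [PySem.Dict.keys_empty]
  rw [PySem.Dict.items_eq_map_keys _ hnd "", hk]
  apply List.map_congr_left
  intro n hn
  have hmem : n ∈ l := (PySem.Set.mem_ofList l n).1 hn
  have h := get?_foldl_insert_fun f l PySem.Dict.empty n
  rw [if_pos hmem] at h
  rw [PySem.Dict.getD_eq_get?_getD, h]
  rfl

theorem get?_pvD (nodes : List String) (P : String → Bool) (u : String) :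
    (pvD nodes P).get? u = if u ∈ nodes then some (pvVal P u) else none := by
  unfold pvD
  rw [get?_foldl_insert_fun]
  simp

theorem get?_pvM (nodes : List String) (split : String) (P : String → Bool) (u : String) :
    (pvM nodes split P).get? u =
      if u = split then some "red" else if u ∈ nodes then some (pvVal P u) else none := by
  unfold pvM
  rw [PySem.Dict.get?_insert, get?_pvD]

theorem contains_pvD (nodes : List String) (P : String → Bool) (u : String) :
    (pvD nodes P).contains u = decide (u ∈ nodes) := by
  rw [PySem.Dict.contains_eq_isSome_get?, get?_pvD]
  by_cases h : u ∈ nodes <;> simp [h]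

theorem items_pvD (nodes : List String) (P : String → Bool) :
    (pvD nodes P).items = (PySem.Set.ofList nodes).map (fun n => (n, pvVal P n)) :=
  items_foldl_insert_fun (pvVal P) nodes

theorem items_pvM (nodes : List String) (split : String) (P : String → Bool) :
    (pvM nodes split P).items =
      if split ∈ nodes then
        (PySem.Set.ofList nodes).map (fun n => (n, if n = split then "red" else pvVal P n))
      else (PySem.Set.ofList nodes).map (fun n => (n, pvVal P n)) ++ [(split, "red")] := by
  unfold pvM
  rw [PySem.Dict.items_insert, contains_pvD, items_pvD]
  by_cases h : split ∈ nodes <;>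
    simp only [h, decide_true, decide_false, if_true, if_false, Bool.false_eq_true]
  · rw [List.map_map]
    apply List.map_congr_left
    intro n hn
    by_cases h2 : n = split <;> simp [h2]

theorem pvM_congr (nodes : List String) (split : String) (P Q : String → Bool)
    (h : ∀ n ∈ nodes, n ≠ split → P n = Q n) : pvM nodes split P = pvM nodes split Q := by
  apply PySem.Dict.ext
  rw [items_pvM, items_pvM]
  by_cases hs : split ∈ nodes <;> simp only [hs, if_true, if_false]
  · apply List.map_congr_left
    intro n hn
    have hmem : n ∈ nodes := (PySem.Set.mem_ofList nodes n).1 hn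
    by_cases h2 : n = split <;> simp [h2, pvVal, h n hmem]
  · congr 1
    apply List.map_congr_left
    intro n hn
    have hmem : n ∈ nodes := (PySem.Set.mem_ofList nodes n).1 hn
    have hne : n ≠ split := fun e => hs (e ▸ hmem)
    simp [pvVal, h n hmem hne]

theorem insert_red (nodes : List String) (split : String) (P : String → Bool) (u : String)
    (hu : u ∈ nodes) :
    (pvM nodes split P).insert u "red" = pvM nodes split (fun x => P x || x == u) := by
  apply PySem.Dict.ext
  have hc : (pvM nodes split P).contains u = true := by
    rw [PySem.Dict.contains_eq_isSome_get?, get?_pvM]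
    by_cases h : u = split <;> simp [h, hu]
  rw [PySem.Dict.items_insert, hc, if_pos rfl, items_pvM, items_pvM]
  by_cases hs : split ∈ nodes <;> simp only [hs, if_true, if_false]
  · rw [List.map_map]
    apply List.map_congr_left
    intro n hn
    by_cases h2 : n = u <;> by_cases h3 : n = split <;>
      simp [h2, h3, pvVal] <;> exact fun e => e.symm
  · rw [List.map_append, List.map_map]
    congr 1
    · apply List.map_congr_left
      intro n hn
      by_cases h2 : n = u <;> simp [h2, pvVal]
    · have : split ≠ u := fun e => hs (e ▸ hu)
      simp [this]


-- `pvSound P`: every P-red node really reaches split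
def pvSound (tree : List (String × String)) (nodes : List String) (split : String)
    (P : String → Bool) : Prop :=
  ∀ x, P x = true → pvReach tree nodes split nodes.length x = true

theorem term_succ (tree : List (String × String)) (nodes : List String) (split : String)
    (f : Nat) (u : String) : pvTerm tree nodes split (f+1) u = (u == split ||
      (decide (u ∈ nodes) && match (PySem.Dict.mk tree).get? u with
        | none => false
        | some v => v == "Null" || pvTerm tree nodes split f v)) := rfl

theorem walk1_succ (tree : List (String × String)) (labels : PySem.Dict String String)
    (f : Nat) (u : String) : pvWalk1 tree labels (f+1) u =
      (match labels.get? u with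
       | none => none
       | some s =>
         if s == "blue" then
           match (PySem.Dict.mk tree).get? u with
           | none => none
           | some v => if v == "Null" then none else pvWalk1 tree labels f v
         else some u) := rfl

theorem walk2_succ (tree : List (String × String)) (value : String) (f : Nat)
    (d : PySem.Dict String String) (u : String) : pvWalk2 tree value (f+1) d u =
      (match d.get? u with
       | none => d
       | some s =>
         if s == "blue" then
           let d' := d.insert u value
           match (PySem.Dict.mk tree).get? u with
           | none => d'
           | some v => if v == "Null" then d' else pvWalk2 tree value f d' v
         else d) := rfl

theorem walk1_lemma (tree : List (String × String)) (nodes : List String) (split : String)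
    (P : String → Bool) (hs : pvSound tree nodes split P) :
    ∀ f u, pvTerm tree nodes split f u = true →
      (pvReach tree nodes split nodes.length u = false →
        pvWalk1 tree (pvM nodes split P) f u = none) ∧
      (pvReach tree nodes split nodes.length u = true →
        ∃ w, pvWalk1 tree (pvM nodes split P) f u = some w ∧
          (pvM nodes split P).get? w = some "red") := by
  intro f
  induction f with
  | zero => intro u h; simp [pvTerm] at h
  | succ f ih =>
    intro u h
    rw [term_succ] at h
    by_cases hus : u = split
    · subst hus
      have hlab : (pvM nodes u P).get? u = some "red" := by
        rw [get?_pvM]; simp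
      constructor
      · intro hr; rw [reach_split] at hr; exact absurd hr (by simp)
      · intro _
        refine ⟨u, ?_, hlab⟩
        rw [walk1_succ, hlab]
        simp
    · have hne : (u == split) = false := by simpa using hus
      rw [hne] at h
      simp only [Bool.false_or, Bool.and_eq_true, decide_eq_true_eq] at h
      obtain ⟨hu, hmatch⟩ := h
      have hnodesne : nodes ≠ [] := by intro e; rw [e] at hu; exact absurd hu (by simp)
      obtain ⟨m, hm⟩ : ∃ m, nodes.length = m + 1 := by
        cases hl : nodes.length with
        | zero => exact absurd (List.length_eq_zero_iff.1 hl) hnodesne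
        | succ m => exact ⟨m, rfl⟩
      cases hg : (PySem.Dict.mk tree).get? u with
      | none =>
        rw [hg] at hmatch
        exact absurd (show false = true from hmatch) (by simp)
      | some v =>
        rw [hg] at hmatch
        replace hmatch : (v == "Null" || pvTerm tree nodes split f v) = true := hmatch
        have hlab : (pvM nodes split P).get? u = some (pvVal P u) := by
          rw [get?_pvM]; simp [hus, hu]
        by_cases hp : P u = true
        · have hred : pvVal P u = "red" := by simp [pvVal, hp]
          constructor
          · intro hr; rw [hs u hp] at hr; exact absurd hr (by simp)
          · intro _
            refine ⟨u, ?_, by rw [hlab, hred]⟩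
            rw [walk1_succ, hlab, hred]
            simp
        · have hblue : pvVal P u = "blue" := by simp [pvVal, hp]
          have hstep : pvWalk1 tree (pvM nodes split P) (f+1) u =
              (if v == "Null" then none else pvWalk1 tree (pvM nodes split P) f v) := by
            rw [walk1_succ, hlab, hblue]
            simp [hg]
          cases hvN : v == "Null" with
          | true =>
            have hv : v = "Null" := by simpa using hvN
            have hrf : pvReach tree nodes split nodes.length u = false := by
              rw [hm, reach_succ, hne, hg]
              simp [hv]
            constructor
            · intro _; rw [hstep, hvN]; rfl
            · intro hr; rw [hrf] at hr; exact absurd hr (by simp)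
          | false =>
            have hv : v ≠ "Null" := by simpa using hvN
            rw [hvN, Bool.false_or] at hmatch
            have hiff := reach_step tree nodes split u v hu hg hv
            have hbool : pvReach tree nodes split nodes.length u =
                pvReach tree nodes split nodes.length v := by
              by_cases h1 : pvReach tree nodes split nodes.length v = true
              · rw [h1, hiff.2 (Or.inr h1)]
              · have h1f : pvReach tree nodes split nodes.length v = false := by
                  simpa using h1
                rw [h1f]
                by_cases h2 : pvReach tree nodes split nodes.length u = true
                · rcases hiff.1 h2 with h3 | h3
                  · exact absurd h3 hus
                  · exact absurd h3 h1
                · simpa using h2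
            have hrec := ih v hmatch
            constructor
            · intro hr
              rw [hstep, hvN]
              simp only [Bool.false_eq_true, if_false]
              exact hrec.1 (hbool ▸ hr)
            · intro hr
              obtain ⟨w, hw1, hw2⟩ := hrec.2 (hbool ▸ hr)
              refine ⟨w, ?_, hw2⟩
              rw [hstep, hvN]
              simpa using hw1

theorem walk2_lemma (tree : List (String × String)) (nodes : List String) (split : String) :
    ∀ f u (P : String → Bool), pvSound tree nodes split P →
      pvTerm tree nodes split f u = true →
      pvReach tree nodes split nodes.length u = true →
      ∃ Q, pvWalk2 tree "red" f (pvM nodes split P) u = pvM nodes split Q ∧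
        pvSound tree nodes split Q ∧ (∀ x, P x = true → Q x = true) ∧
        (Q u = true ∨ u = split) := by
  intro f
  induction f with
  | zero => intro u P _ h; simp [pvTerm] at h
  | succ f ih =>
    intro u P hs h hr
    rw [term_succ] at h
    by_cases hus : u = split
    · subst hus
      have hlab : (pvM nodes u P).get? u = some "red" := by
        rw [get?_pvM]; simp
      refine ⟨P, ?_, hs, fun x hx => hx, Or.inr rfl⟩
      rw [walk2_succ, hlab]
      simp
    · have hne : (u == split) = false := by simpa using hus
      rw [hne] at h
      simp only [Bool.false_or, Bool.and_eq_true, decide_eq_true_eq] at h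
      obtain ⟨hu, hmatch⟩ := h
      cases hg : (PySem.Dict.mk tree).get? u with
      | none =>
        rw [hg] at hmatch
        exact absurd (show false = true from hmatch) (by simp)
      | some v =>
        rw [hg] at hmatch
        replace hmatch : (v == "Null" || pvTerm tree nodes split f v) = true := hmatch
        have hlab : (pvM nodes split P).get? u = some (pvVal P u) := by
          rw [get?_pvM]; simp [hus, hu]
        by_cases hp : P u = true
        · have hred : pvVal P u = "red" := by simp [pvVal, hp]
          refine ⟨P, ?_, hs, fun x hx => hx, Or.inl hp⟩
          rw [walk2_succ, hlab, hred]
          simp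
        · have hblue : pvVal P u = "blue" := by simp [pvVal, hp]
          have hins : (pvM nodes split P).insert u "red" =
              pvM nodes split (fun x => P x || x == u) := insert_red nodes split P u hu
          have hsP' : pvSound tree nodes split (fun x => P x || x == u) := by
            intro x hx
            rw [Bool.or_eq_true] at hx
            rcases hx with h1 | h1
            · exact hs x h1
            · have hxu : x = u := by simpa using h1
              exact hxu ▸ hr
          have hstep : pvWalk2 tree "red" (f+1) (pvM nodes split P) u =
              (if v == "Null" then pvM nodes split (fun x => P x || x == u)
               else pvWalk2 tree "red" f (pvM nodes split (fun x => P x || x == u)) v) := by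
            rw [walk2_succ, hlab, hblue]
            simp only [hg, hins]
            rfl
          cases hvN : v == "Null" with
          | true =>
            refine ⟨(fun x => P x || x == u), ?_, hsP', fun x hx => by simp [hx],
              Or.inl (by simp)⟩
            rw [hstep, hvN]
            rfl
          | false =>
            have hv : v ≠ "Null" := by simpa using hvN
            rw [hvN, Bool.false_or] at hmatch
            have hrv : pvReach tree nodes split nodes.length v = true := by
              rcases (reach_step tree nodes split u v hu hg hv).1 hr with h1 | h1
              · exact absurd h1 hus
              · exact h1
            obtain ⟨Q, hQ1, hQ2, hQ3, _⟩ := ih v (fun x => P x || x == u) hsP' hmatch hrv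
            refine ⟨Q, ?_, hQ2, fun x hx => hQ3 x (by simp [hx]), Or.inl (hQ3 u (by simp))⟩
            rw [hstep, hvN]
            simpa using hQ1

theorem fold_lemma (tree : List (String × String)) (nodes : List String) (split : String) :
    ∀ (l : List String) (P : String → Bool), pvSound tree nodes split P →
      (∀ n ∈ l, pvTerm tree nodes split (nodes.length + 1) n = true) →
      ∃ Q, l.foldl (fun d n =>
          match pvWalk1 tree d (nodes.length + 1) n with
          | none => d
          | some w => pvWalk2 tree ((d.get? w).getD "") (nodes.length + 1) d n)
          (pvM nodes split P) = pvM nodes split Q ∧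
        pvSound tree nodes split Q ∧ (∀ x, P x = true → Q x = true) ∧
        (∀ n ∈ l, pvReach tree nodes split nodes.length n = true →
          (Q n = true ∨ n = split)) := by
  intro l
  induction l with
  | nil =>
    intro P hs _
    exact ⟨P, rfl, hs, fun x hx => hx, by simp⟩
  | cons n t ih =>
    intro P hs hterm
    have htn := hterm n (by simp)
    have hw1 := walk1_lemma tree nodes split P hs (nodes.length + 1) n htn
    have hstep : ∃ P', (match pvWalk1 tree (pvM nodes split P) (nodes.length + 1) n with
          | none => pvM nodes split P
          | some w => pvWalk2 tree (((pvM nodes split P).get? w).getD "")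
              (nodes.length + 1) (pvM nodes split P) n) = pvM nodes split P' ∧
        pvSound tree nodes split P' ∧ (∀ x, P x = true → P' x = true) ∧
        (pvReach tree nodes split nodes.length n = true → (P' n = true ∨ n = split)) := by
      cases hr : pvReach tree nodes split nodes.length n with
      | false =>
        rw [hw1.1 hr]
        exact ⟨P, rfl, hs, fun x hx => hx, fun hh => absurd hh (by simp [hr])⟩
      | true =>
        obtain ⟨w, hw, hwred⟩ := hw1.2 hr
        obtain ⟨Q, hQ1, hQ2, hQ3, hQ4⟩ := walk2_lemma tree nodes split
          (nodes.length + 1) n P hs htn hr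
        refine ⟨Q, ?_, hQ2, hQ3, fun _ => hQ4⟩
        rw [hw]
        show pvWalk2 tree (((pvM nodes split P).get? w).getD "") (nodes.length + 1)
            (pvM nodes split P) n = pvM nodes split Q
        rw [hwred]
        exact hQ1
    obtain ⟨P', hP'1, hP'2, hP'3, hP'4⟩ := hstep
    obtain ⟨Q, hQ1, hQ2, hQ3, hQ4⟩ := ih P' hP'2 (fun x hx => hterm x (by simp [hx]))
    refine ⟨Q, ?_, hQ2, fun x hx => hQ3 x (hP'3 x hx), ?_⟩
    · rw [List.foldl_cons, hP'1]
      exact hQ1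
    · intro x hx hrx
      rcases List.mem_cons.1 hx with h1 | h1
      · subst h1
        rcases hP'4 hrx with h2 | h2
        · exact Or.inl (hQ3 x h2)
        · exact Or.inr h2
      · exact hQ4 x h1 hrx

theorem B_round_invariant (tree : List (String × String)) (nodes : List String)
    (split : String) :
    ∀ (l : List Nat) (r : PySem.Set String) (i : Nat),
      (∀ u, u ∈ r ↔ pvReach tree nodes split i u = true) →
      ∀ u, u ∈ l.foldl (fun r _ => PySem.Set.union r (nodes.filter (fun n =>
          match (PySem.Dict.mk tree).get? n with
          | some p => p != "Null" && PySem.Set.contains r p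
          | none => false))) r ↔ pvReach tree nodes split (i + l.length) u = true := by
  intro l
  induction l with
  | nil => intro r i h u; simpa using h u
  | cons a t ih =>
    intro r i h u
    rw [List.foldl_cons]
    have hnext : ∀ u, u ∈ PySem.Set.union r (nodes.filter (fun n =>
        match (PySem.Dict.mk tree).get? n with
        | some p => p != "Null" && PySem.Set.contains r p
        | none => false)) ↔ pvReach tree nodes split (i + 1) u = true := by
      intro x
      rw [PySem.Set.mem_union]
      constructor
      · intro hx
        rcases hx with hx | hx
        · exact reach_mono tree nodes split i x ((h x).1 hx)
        · obtain ⟨hxn, hcond⟩ := List.mem_filter.1 hx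
          cases hg : (PySem.Dict.mk tree).get? x with
          | none =>
            rw [hg] at hcond
            exact absurd (show false = true from hcond) (by simp)
          | some p =>
            rw [hg] at hcond
            replace hcond : (p != "Null" && PySem.Set.contains r p) = true := hcond
            rw [Bool.and_eq_true] at hcond
            obtain ⟨hp1, hp2⟩ := hcond
            have hpr : p ∈ r := (PySem.Set.contains_iff r p).1 hp2
            rw [reach_succ, hg]
            show (x == split || (decide (x ∈ nodes) &&
              (p != "Null" && pvReach tree nodes split i p))) = true
            simp only [Bool.or_eq_true, Bool.and_eq_true, decide_eq_true_eq]
            exact Or.inr ⟨hxn, hp1, (h p).1 hpr⟩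
      · intro hx
        rw [reach_succ, Bool.or_eq_true] at hx
        rcases hx with h1 | h1
        · have hxs : x = split := by simpa using h1
          exact Or.inl ((h x).2 (hxs ▸ reach_split tree nodes split i))
        · rw [Bool.and_eq_true] at h1
          obtain ⟨h2, h3⟩ := h1
          cases hg : (PySem.Dict.mk tree).get? x with
          | none =>
            rw [hg] at h3
            exact absurd (show false = true from h3) (by simp)
          | some p =>
            rw [hg] at h3
            replace h3 : (p != "Null" && pvReach tree nodes split i p) = true := h3
            rw [Bool.and_eq_true] at h3
            obtain ⟨h4, h5⟩ := h3
            right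
            refine List.mem_filter.2 ⟨by simpa using h2, ?_⟩
            show (match (PySem.Dict.mk tree).get? x with
              | some p => p != "Null" && PySem.Set.contains r p
              | none => false) = true
            rw [hg]
            show (p != "Null" && PySem.Set.contains r p) = true
            rw [Bool.and_eq_true]
            exact ⟨h4, (PySem.Set.contains_iff r p).2 ((h p).2 h5)⟩
    have hfin := ih _ (i + 1) hnext u
    rw [show i + 1 + t.length = i + (a :: t).length by simp; omega] at hfin
    exact hfin

theorem B_eq (tree : List (String × String)) (nodes : List String) (split : String) :
    colorTree_alt tree nodes split =
      (pvM nodes split (fun n => pvReach tree nodes split nodes.length n)).items := by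
  simp only [colorTree_alt]
  have hstart : ∀ u, u ∈ PySem.Set.ofList [split] ↔ pvReach tree nodes split 0 u = true := by
    intro u
    rw [PySem.Set.mem_ofList]
    show u ∈ [split] ↔ (u == split) = true
    constructor
    · intro hu
      have hu' : u = split := by simpa using hu
      simp [hu']
    · intro hb
      have hb' : u = split := by simpa using hb
      simp [hb']
  have hred := B_round_invariant tree nodes split (List.range nodes.length)
    (PySem.Set.ofList [split]) 0 hstart
  rw [List.length_range] at hred
  simp only [Nat.zero_add] at hred
  have hfun : (fun (d : PySem.Dict String String) n => d.insert n
      (if PySem.Set.contains ((List.range nodes.length).foldl (fun r _ =>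
          PySem.Set.union r (nodes.filter (fun n =>
            match (PySem.Dict.mk tree).get? n with
            | some p => p != "Null" && PySem.Set.contains r p
            | none => false))) (PySem.Set.ofList [split])) n = true then "red" else "blue")) =
      (fun (d : PySem.Dict String String) n => d.insert n
        (pvVal (fun n => pvReach tree nodes split nodes.length n) n)) := by
    funext d n
    congr 1
    rw [pvVal]
    by_cases hn : pvReach tree nodes split nodes.length n = true
    · rw [if_pos hn, if_pos ((PySem.Set.contains_iff _ n).2 ((hred n).2 hn))]
    · rw [if_neg hn, if_neg ?_]
      intro hc
      exact hn ((hred n).1 ((PySem.Set.contains_iff _ n).1 hc))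
  rw [hfun]
  rfl

theorem A_eq (tree : List (String × String)) (nodes : List String) (split : String)
    (hpre : Pre_colorTree tree nodes split) :
    colorTree tree nodes split =
      (pvM nodes split (fun n => pvReach tree nodes split nodes.length n)).items := by
  simp only [colorTree]
  have hfun : (fun (d : PySem.Dict String String) n => d.insert n "blue") =
      (fun (d : PySem.Dict String String) n => d.insert n (pvVal (fun _ => false) n)) := by
    funext d n; rfl
  rw [hfun]
  have hsound : pvSound tree nodes split (fun _ => false) := by
    intro x hx; simp at hx
  obtain ⟨Q, hQ1, hQ2, _, hQ4⟩ := fold_lemma tree nodes split nodes (fun _ => false)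
    hsound hpre
  have hM : (nodes.foldl (fun d n => d.insert n (pvVal (fun _ => false) n))
      PySem.Dict.empty).insert split "red" = pvM nodes split (fun _ => false) := rfl
  rw [hM, hQ1]
  congr 1
  apply pvM_congr
  intro n hn hns
  cases hr : pvReach tree nodes split nodes.length n with
  | true =>
    rcases hQ4 n hn hr with h1 | h1
    · exact h1
    · exact absurd h1 hns
  | false =>
    cases hq : Q n with
    | false => rfl
    | true => rw [hQ2 n hq] at hr; exact absurd hr (by simp)

-- ===== VERDICT (by name: the statement is the Claim_ definition above) =====
theorem colorTree_spec : Claim_equal_colorTree := by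
  intro tree nodes split _ hpre
  unfold Spec_colorTree
  rw [A_eq tree nodes split hpre, B_eq tree nodes split]
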